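-- pv_equiv track=rewrite | github.com/kcsmilak/AoC-2023 | p25.py | reduceBags
-- ===== SOURCE A (Python) =====
-- def reduceBags(currentBags):
--     bags = []
--     for testBag in currentBags:
--
--         componentList = []
--         for component in currentBags[testBag]:
--             componentList.append(component)
--
--
--         foundUsableBag = False
--         for i, bag in enumerate(bags):
--             # if the bag contains any of the components, add all
--             for component in componentList:
--                 if component in bag:
--                     foundUsableBag = True
--                     break
--             if foundUsableBag:
--                 for component in componentList:
--                     bag[component] = True
--                 break
--         if not foundUsableBag:
--             bags.append({})
--             for component in componentList:
--                 bags[len(bags)-1][component] = True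
--
--     return bags
-- ===== SOURCE B (Python) =====
-- def reduceBags(currentBags):
--     # A component->first-bag-index map replaces the scan over all bags per input.
--     bags = []
--     where = {}  # component -> smallest index of a bag containing it
--     for components in currentBags.values():
--         hit = [where[c] for c in components if c in where]
--         if hit:
--             t = min(hit)
--             bag = bags[t]
--             for c in components:
--                 bag[c] = True
--                 if c not in where or where[c] > t:
--                     where[c] = t
--         else:
--             t = len(bags)
--             bags.append({c: True for c in components})
--             for c in components:
--                 where.setdefault(c, t)
--     return bags
-- ===== Notes on version B (the rewrite author's own statement) =====
-- stated objective: alternative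
-- what changed: B keeps a component-to-first-bag-index dictionary and takes one min over the mapped indices of the current components, replacing A's scan over all existing bags (with a membership test per component) for every input bag.
import Mathlib
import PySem

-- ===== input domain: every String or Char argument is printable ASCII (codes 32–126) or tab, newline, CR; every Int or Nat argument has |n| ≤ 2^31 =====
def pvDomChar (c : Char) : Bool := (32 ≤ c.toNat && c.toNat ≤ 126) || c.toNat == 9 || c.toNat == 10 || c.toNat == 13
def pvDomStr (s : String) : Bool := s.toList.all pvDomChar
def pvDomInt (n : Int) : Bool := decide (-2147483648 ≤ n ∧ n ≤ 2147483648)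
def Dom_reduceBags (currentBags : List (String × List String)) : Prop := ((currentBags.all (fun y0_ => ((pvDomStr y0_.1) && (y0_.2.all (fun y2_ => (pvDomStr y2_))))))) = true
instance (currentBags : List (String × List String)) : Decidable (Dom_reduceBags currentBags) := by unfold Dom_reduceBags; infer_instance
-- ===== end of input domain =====

-- B replaces A's per-input scan over all bags by a component→first-bag-index map (objective: alternative algorithm of similar measured cost).


-- ===== PORT A =====
-- A's "for component in componentList: bag[component] = True" loop
def pvAddAll (comps : List String) (bag : PySem.Dict String Bool) : PySem.Dict String Bool :=
  comps.foldl (fun b c => b.insert c true) bag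

-- A's "for i, bag in enumerate(bags)" loop with its break: scan the bags in order,
-- merge the components into the first bag sharing one, report foundUsableBag.
def pvPlace (comps : List String) : List (PySem.Dict String Bool) → List (PySem.Dict String Bool) × Bool
  | [] => ([], false)
  | bag :: rest =>
    if comps.any (fun c => bag.contains c) then
      (pvAddAll comps bag :: rest, true)
    else
      let r := pvPlace comps rest
      (bag :: r.1, r.2)

def reduceBags (currentBags : List (String × List String)) : List (List (String × Bool)) :=
  (currentBags.foldl (fun bags kv =>
      -- componentList = [] ; for component in currentBags[testBag]: componentList.append(component)
      let componentList :=
        (((PySem.Dict.mk currentBags).get? kv.1).getD []).foldl (fun acc c => acc ++ [c]) []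
      let r := pvPlace componentList bags
      if r.2 then r.1 else r.1 ++ [pvAddAll componentList PySem.Dict.empty]) []).map PySem.Dict.items

-- ===== PORT B =====
-- one step of B's loop over currentBags.values(); state = (bags, where)
def pvAltStep (st : List (PySem.Dict String Bool) × PySem.Dict String Nat) (comps : List String) :
    List (PySem.Dict String Bool) × PySem.Dict String Nat :=
  let hit := comps.filterMap (fun c => st.2.get? c)
  match PySem.List.min? hit (fun x => x) with
  | some t =>
      (st.1.modify t (fun bag => comps.foldl (fun b c => b.insert c true) bag),
       comps.foldl (fun w c =>
         match w.get? c with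
         | some j => if t < j then w.insert c t else w
         | none => w.insert c t) st.2)
  | none =>
      (st.1 ++ [comps.foldl (fun b c => b.insert c true) PySem.Dict.empty],
       comps.foldl (fun w c => w.setdefault c st.1.length) st.2)

def reduceBags_alt (currentBags : List (String × List String)) : List (List (String × Bool)) :=
  ((currentBags.map Prod.snd).foldl pvAltStep ([], PySem.Dict.empty)).1.map PySem.Dict.items

-- ===== PRECONDITION & SPEC =====
-- Pre_ excludes association lists with duplicate keys: they are not the encoding of any value of the
-- declared parameter type dict[str, list[str]] (a Python dict has unique keys), so the ports'
-- first-match-lookup behaviour there is an artefact of the assoc-list encoding.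
def Pre_reduceBags (currentBags : List (String × List String)) : Prop :=
  (currentBags.map Prod.fst).Nodup
instance (currentBags : List (String × List String)) : Decidable (Pre_reduceBags currentBags) := by unfold Pre_reduceBags; infer_instance

def pvWitness_reduceBags : (List (String × List String)) :=
  [("ab", ["x", "y"]), ("cd", ["y", "z"]), ("ef", ["q"])]

def Spec_reduceBags (currentBags : List (String × List String)) (out : List (List (String × Bool))) : Prop := out = reduceBags_alt currentBags
instance (currentBags : List (String × List String)) (out : List (List (String × Bool))) : Decidable (Spec_reduceBags currentBags out) := by unfold Spec_reduceBags; infer_instance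

-- ===== CLAIM (what is proved, stated in full; the proofs are below) =====
def Claim_equal_reduceBags : Prop := ∀ (currentBags : List (String × List String)), Dom_reduceBags currentBags → Pre_reduceBags currentBags → Spec_reduceBags currentBags (reduceBags currentBags)

-- ===== LEMMAS AND PROOFS =====

-- min of an optional previous index and a new index t
def pvOmin : Option Nat → Nat → Nat
  | some j, t => min j t
  | none, t => t

-- where-map invariant: where maps each component to the first bag index containing it
def pvInv (bags : List (PySem.Dict String Bool)) (wh : PySem.Dict String Nat) : Prop :=
  ∀ c, wh.get? c = bags.findIdx? (fun b => b.contains c)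

-- A's loop body with the component list already in hand
def pvStepA (bags : List (PySem.Dict String Bool)) (comps : List String) :
    List (PySem.Dict String Bool) :=
  let r := pvPlace comps bags
  if r.2 then r.1 else r.1 ++ [pvAddAll comps PySem.Dict.empty]

lemma contains_pvAddAll (comps : List String) (bag : PySem.Dict String Bool) (c : String) :
    (pvAddAll comps bag).contains c = (decide (c ∈ comps) || bag.contains c) := by
  induction comps generalizing bag with
  | nil => simp [pvAddAll]
  | cons x xs ih =>
    simp only [pvAddAll, List.foldl_cons] at ih ⊢
    rw [ih]
    simp [PySem.Dict.contains_insert]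
    by_cases h : c = x
    · simp [h]
    · rw [beq_eq_false_iff_ne.mpr h]
      simp [h]

lemma foldl_min_map_succ (t : List Nat) : ∀ x : Nat,
    (t.map (· + 1)).foldl min (x + 1) = t.foldl min x + 1 := by
  induction t with
  | nil => intro x; simp
  | cons y ys ih =>
    intro x
    simp only [List.map_cons, List.foldl_cons]
    rw [show min (x + 1) (y + 1) = min x y + 1 by omega, ih]

lemma min?_id_map_succ (xs : List Nat) :
    PySem.List.min? (xs.map (· + 1)) (fun x => x) = (PySem.List.min? xs (fun x => x)).map (· + 1) := by
  cases xs with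
  | nil =>
    rw [show PySem.List.min? ([] : List Nat) (fun x => x) = none from
      (PySem.List.min?_eq_none_iff _ _).mpr rfl]
    rfl
  | cons x t =>
    rw [List.map_cons, PySem.List.min?_id_cons, PySem.List.min?_id_cons]
    simp [foldl_min_map_succ]

lemma findIdx?_any_eq_min? (comps : List String) (bags : List (PySem.Dict String Bool)) :
    bags.findIdx? (fun b => comps.any (fun c => b.contains c)) =
    PySem.List.min? (comps.filterMap (fun c => bags.findIdx? (fun b => b.contains c))) (fun x => x) := by
  induction bags with
  | nil =>
    rw [List.findIdx?_nil, List.filterMap_eq_nil_iff.mpr (fun a _ => List.findIdx?_nil),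
      (PySem.List.min?_eq_none_iff ([] : List Nat) (fun x => x)).mpr rfl]
  | cons bag rest ih =>
    by_cases h : comps.any (fun c => bag.contains c)
    · rw [List.findIdx?_cons, if_pos h]
      obtain ⟨c, hc, hcc⟩ := List.any_eq_true.mp h
      set L := comps.filterMap (fun c => (bag :: rest).findIdx? (fun b => b.contains c)) with hL
      have h0 : (0 : Nat) ∈ L := by
        rw [hL]
        exact List.mem_filterMap.mpr ⟨c, hc, by rw [List.findIdx?_cons, if_pos hcc]⟩
      cases hm : PySem.List.min? L (fun x => x) with
      | none =>
        rw [PySem.List.min?_eq_none_iff] at hm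
        simp [hm] at h0
      | some m =>
        have hmin := PySem.List.min?_isMin hm 0 h0
        simp only [Nat.le_zero] at hmin
        rw [hmin]
    · rw [List.findIdx?_cons, if_neg h]
      have hall : ∀ c ∈ comps, bag.contains c = false := by
        intro c hc
        by_contra hcon
        exact h (List.any_eq_true.mpr ⟨c, hc, by simpa using hcon⟩)
      have hfm : comps.filterMap (fun c => (bag :: rest).findIdx? (fun b => b.contains c)) =
          (comps.filterMap (fun c => rest.findIdx? (fun b => b.contains c))).map (· + 1) := by
        rw [List.map_filterMap]
        apply List.filterMap_congr
        intro c hc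
        rw [List.findIdx?_cons, if_neg (by simp [hall c hc])]
      rw [hfm, min?_id_map_succ, ih]

lemma pvPlace_eq (comps : List String) (bags : List (PySem.Dict String Bool)) :
    pvPlace comps bags =
      match bags.findIdx? (fun b => comps.any (fun c => b.contains c)) with
      | some t => (bags.modify t (pvAddAll comps), true)
      | none => (bags, false) := by
  induction bags with
  | nil => simp [pvPlace]
  | cons bag rest ih =>
    by_cases h : comps.any (fun c => bag.contains c)
    · rw [List.findIdx?_cons, if_pos h]
      simp [pvPlace, h, List.modify_zero_cons]
    · rw [List.findIdx?_cons, if_neg h]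
      simp only [pvPlace, h, Bool.false_eq_true, if_false, ih]
      cases hf : rest.findIdx? (fun b => comps.any (fun c => b.contains c)) <;>
        simp [List.modify_succ_cons]

lemma get?_mergeFold (comps : List String) (t : Nat) (c : String) : ∀ wh : PySem.Dict String Nat,
    (comps.foldl (fun w c =>
        match w.get? c with
        | some j => if t < j then w.insert c t else w
        | none => w.insert c t) wh).get? c =
    if c ∈ comps then some (pvOmin (wh.get? c) t) else wh.get? c := by
  induction comps with
  | nil => intro wh; simp
  | cons x xs ih =>
    intro wh
    simp only [List.foldl_cons]
    rw [ih]
    by_cases hx : c = x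
    · subst hx
      rcases hg : wh.get? c with _ | j
      · simp [pvOmin]
      · by_cases ht : t < j <;> simp [hg, ht, pvOmin] <;> omega
    · have hget : (match wh.get? x with
          | some j => if t < j then wh.insert x t else wh
          | none => wh.insert x t).get? c = wh.get? c := by
        rcases hgx : wh.get? x with _ | j
        · exact PySem.Dict.get?_insert_of_ne wh t hx
        · show (if t < j then wh.insert x t else wh).get? c = wh.get? c
          by_cases htj : t < j
          · rw [if_pos htj]
            exact PySem.Dict.get?_insert_of_ne wh t hx
          · rw [if_neg htj]
      rw [hget]
      simp [List.mem_cons, hx]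

lemma get?_setdefaultFold (comps : List String) (n : Nat) (c : String) :
    ∀ wh : PySem.Dict String Nat, (∀ c' ∈ comps, wh.get? c' = none ∨ wh.get? c' = some n) →
    (comps.foldl (fun w c => w.setdefault c n) wh).get? c =
    if c ∈ comps then some n else wh.get? c := by
  induction comps with
  | nil => intro wh _; simp
  | cons x xs ih =>
    intro wh h
    simp only [List.foldl_cons]
    have hstep : ∀ c', (wh.setdefault x n).get? c' =
        if c' = x then some n else wh.get? c' := by
      intro c'
      rcases h x (List.mem_cons_self) with hx | hx
      · rw [PySem.Dict.setdefault_of_not_contains wh n (by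
          rw [PySem.Dict.contains_eq_isSome_get?, hx]; rfl)]
        rw [PySem.Dict.get?_insert]
      · rw [PySem.Dict.setdefault_of_contains wh n (by
          rw [PySem.Dict.contains_eq_isSome_get?, hx]; rfl)]
        split
        · next he => rw [he, hx]
        · rfl
    rw [ih (wh.setdefault x n) (by
      intro c' hc'
      rw [hstep c']
      split
      · right; rfl
      · exact h c' (List.mem_cons_of_mem _ hc'))]
    rw [hstep c]
    by_cases hcx : c = x <;> by_cases hcm : c ∈ xs <;> simp [hcx, hcm]

lemma findIdx?_modify_true {α : Type} (p : α → Bool) (f : α → α) (hf : ∀ b, p (f b) = true) :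
    ∀ (bags : List α) (t : Nat), t < bags.length →
    (bags.modify t f).findIdx? p = some (pvOmin (bags.findIdx? p) t) := by
  intro bags
  induction bags with
  | nil => intro t ht; simp at ht
  | cons b rest ih =>
    intro t ht
    cases t with
    | zero =>
      rw [List.modify_zero_cons, List.findIdx?_cons, if_pos (hf b)]
      rw [List.findIdx?_cons]
      by_cases hb : p b
      · simp [hb, pvOmin]
      · simp [hb]
        cases rest.findIdx? p <;> simp [pvOmin]
    | succ t =>
      rw [List.modify_succ_cons, List.findIdx?_cons, List.findIdx?_cons]
      by_cases hb : p b
      · simp [hb, pvOmin]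
      · simp only [hb, Bool.false_eq_true, if_false]
        rw [ih t (by simpa using ht)]
        cases rest.findIdx? p <;> simp [pvOmin]

lemma findIdx?_modify_congr {α : Type} (p : α → Bool) (f : α → α) (hf : ∀ b, p (f b) = p b) :
    ∀ (bags : List α) (t : Nat), (bags.modify t f).findIdx? p = bags.findIdx? p := by
  intro bags
  induction bags with
  | nil => intro t; simp
  | cons b rest ih =>
    intro t
    cases t with
    | zero => rw [List.modify_zero_cons, List.findIdx?_cons, List.findIdx?_cons, hf b]
    | succ t => rw [List.modify_succ_cons, List.findIdx?_cons, List.findIdx?_cons, ih t]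

lemma step_eq_and_inv (bags : List (PySem.Dict String Bool)) (wh : PySem.Dict String Nat)
    (comps : List String) (hinv : pvInv bags wh) :
    pvStepA bags comps = (pvAltStep (bags, wh) comps).1 ∧
    pvInv (pvAltStep (bags, wh) comps).1 (pvAltStep (bags, wh) comps).2 := by
  have hhit : comps.filterMap (fun c => wh.get? c) =
      comps.filterMap (fun c => bags.findIdx? (fun b => b.contains c)) :=
    List.filterMap_congr (fun c _ => hinv c)
  have hfind : bags.findIdx? (fun b => comps.any (fun c => b.contains c)) =
      PySem.List.min? (comps.filterMap (fun c => wh.get? c)) (fun x => x) := by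
    rw [hhit]; exact findIdx?_any_eq_min? comps bags
  unfold pvAltStep
  simp only []
  cases hm : PySem.List.min? (comps.filterMap (fun c => wh.get? c)) (fun x => x) with
  | none =>
    have hfn : bags.findIdx? (fun b => comps.any (fun c => b.contains c)) = none := by
      rw [hfind, hm]
    have hnone : ∀ c' ∈ comps, wh.get? c' = none := by
      rw [PySem.List.min?_eq_none_iff] at hm
      exact List.filterMap_eq_nil_iff.mp hm
    constructor
    · unfold pvStepA
      rw [pvPlace_eq, hfn]
      rfl
    · intro c
      rw [get?_setdefaultFold comps bags.length c wh
        (fun c' hc' => Or.inl (hnone c' hc'))]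
      rw [List.findIdx?_append]
      have hnb : (comps.foldl (fun b c => b.insert c true) PySem.Dict.empty).contains c =
          decide (c ∈ comps) := by
        have := contains_pvAddAll comps PySem.Dict.empty c
        simpa [pvAddAll] using this
      by_cases hc : c ∈ comps
      · have : bags.findIdx? (fun b => b.contains c) = none := by
          rw [← hinv c]; exact hnone c hc
        rw [this]
        simp [List.findIdx?_cons, hnb, hc]
      · rw [List.findIdx?_cons]
        simp only [hnb, hc, decide_false, Bool.false_eq_true, if_false,
          List.findIdx?_nil, Option.map_none, Option.or_none]
        exact hinv c
  | some t =>
    have hfs : bags.findIdx? (fun b => comps.any (fun c => b.contains c)) = some t := by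
      rw [hfind, hm]
    have ht : t < bags.length := by
      have hmem := PySem.List.min?_mem hm
      rw [hhit] at hmem
      obtain ⟨c0, _, hc0⟩ := List.mem_filterMap.mp hmem
      exact (List.findIdx?_eq_some_iff_getElem.mp hc0).1
    constructor
    · unfold pvStepA
      rw [pvPlace_eq, hfs]
      rfl
    · intro c
      rw [get?_mergeFold comps t c wh]
      by_cases hc : c ∈ comps
      · rw [if_pos hc]
        rw [findIdx?_modify_true (fun b => b.contains c)
          (fun bag => comps.foldl (fun b c => b.insert c true) bag)
          (fun b => by
            have := contains_pvAddAll comps b c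
            simp only [pvAddAll] at this
            simp [this, hc]) bags t ht]
        rw [hinv c]
      · rw [if_neg hc]
        rw [findIdx?_modify_congr (fun b => b.contains c)
          (fun bag => comps.foldl (fun b c => b.insert c true) bag)
          (fun b => by
            have := contains_pvAddAll comps b c
            simp only [pvAddAll] at this
            simp [this, hc]) bags t]
        exact hinv c

lemma main_fold : ∀ (l : List (List String)) (bags : List (PySem.Dict String Bool))
    (wh : PySem.Dict String Nat), pvInv bags wh →
    l.foldl pvStepA bags = (l.foldl pvAltStep (bags, wh)).1 := by
  intro l
  induction l with
  | nil => intro bags wh _; rfl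
  | cons comps rest ih =>
    intro bags wh hinv
    obtain ⟨heq, hinv'⟩ := step_eq_and_inv bags wh comps hinv
    simp only [List.foldl_cons]
    rw [heq]
    have := ih (pvAltStep (bags, wh) comps).1 (pvAltStep (bags, wh) comps).2 hinv'
    simpa using this

-- ===== VERDICT (by name: the statement is the Claim_ definition above) =====
theorem reduceBags_spec : Claim_equal_reduceBags := by
  unfold Claim_equal_reduceBags
  intro cb _ hpre
  unfold Spec_reduceBags reduceBags reduceBags_alt
  congr 1
  rw [PySem.List.foldl_congr_mem cb _ (fun bags kv => pvStepA bags kv.2) [] (by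
    intro acc kv hkv
    have hget : (PySem.Dict.mk cb).get? kv.1 = some kv.2 := by
      apply PySem.Dict.get?_of_mem_items
      · exact hkv
      · exact hpre
    simp only [hget, Option.getD_some, PySem.List.foldl_append_singleton, List.nil_append]
    rfl)]
  have hbase : pvInv [] PySem.Dict.empty := by
    intro c
    simp [PySem.Dict.get?_empty]
  have := main_fold (cb.map Prod.snd) [] PySem.Dict.empty hbase
  simp only [List.foldl_map] at this ⊢
  exact this
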